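-- pv_equiv track=rewrite | github.com/MrBrantCode/unitest_baseline | mut_generate/mist_train_cf/cf_90941/solution.py | longest_sublist_with_sum_greater_than_target
-- ===== SOURCE A (Python) =====
-- def longest_sublist_with_sum_greater_than_target(list_of_lists, target):
--     longest_sublist = []
--     longest_length = 0
--
--     for sublist in list_of_lists:
--         sublist_sum = sum(sublist)
--
--         if sublist_sum > target and len(sublist) > longest_length:
--             longest_sublist = sublist
--             longest_length = len(sublist)
--
--     return longest_sublist
-- ===== SOURCE B (Python) =====
-- def longest_sublist_with_sum_greater_than_target(list_of_lists, target):
--     # Divide-and-conquer tournament: recursively halve the index range, take the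
--     # winner of each half, and let the right half win only when strictly longer
--     # (which preserves the first-of-maximal-length tie-break).
--     def best(lo, hi):
--         if hi - lo == 0:
--             return []
--         if hi - lo == 1:
--             s = list_of_lists[lo]
--             return s if sum(s) > target else []
--         mid = (lo + hi) // 2
--         left = best(lo, mid)
--         right = best(mid, hi)
--         return right if len(right) > len(left) else left
--     return best(0, len(list_of_lists))
-- ===== Notes on version B (the rewrite author's own statement) =====
-- stated objective: alternative
-- what changed: Replaced A's sequential best-so-far scan by a recursive divide-and-conquer tournament over index ranges: each half is solved independently and the winners are combined with a strict length comparison (right wins only if strictly longer), which preserves A's first-maximal tie-break.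
import Mathlib
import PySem

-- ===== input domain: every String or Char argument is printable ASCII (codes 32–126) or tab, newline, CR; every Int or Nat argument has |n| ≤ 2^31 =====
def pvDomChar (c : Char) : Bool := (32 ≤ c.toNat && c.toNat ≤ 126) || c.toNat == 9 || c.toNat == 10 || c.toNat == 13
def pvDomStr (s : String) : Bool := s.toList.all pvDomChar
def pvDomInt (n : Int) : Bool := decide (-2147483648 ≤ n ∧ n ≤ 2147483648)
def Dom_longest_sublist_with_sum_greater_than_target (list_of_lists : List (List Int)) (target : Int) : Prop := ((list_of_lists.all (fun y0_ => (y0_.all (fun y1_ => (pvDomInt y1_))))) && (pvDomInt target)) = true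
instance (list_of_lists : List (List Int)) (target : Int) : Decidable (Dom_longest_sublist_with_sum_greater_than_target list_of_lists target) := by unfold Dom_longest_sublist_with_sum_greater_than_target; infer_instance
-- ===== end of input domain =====

-- B replaces A's sequential best-so-far scan by a recursive divide-and-conquer tournament over
-- index ranges (objective: alternative; same asymptotic cost).

-- ===== PORT A =====
def longest_sublist_with_sum_greater_than_target (list_of_lists : List (List Int)) (target : Int) : List Int :=
  (list_of_lists.foldl
    (fun (st : List Int × Nat) sublist =>
      let sublist_sum := sublist.sum
      if sublist_sum > target ∧ sublist.length > st.2 then (sublist, sublist.length) else st)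
    (([] : List Int), 0)).1

-- ===== PORT B =====
-- best(lo, hi) of Source B; indices are always 0 ≤ lo < hi ≤ len, so list_of_lists[lo] is
-- exactly List.getD lo [] here.
def pvBest (list_of_lists : List (List Int)) (target : Int) (lo hi : Nat) : List Int :=
  if hi - lo = 0 then []
  else if hi - lo = 1 then
    let s := list_of_lists.getD lo []
    if s.sum > target then s else []
  else
    let mid := (lo + hi) / 2
    let left := pvBest list_of_lists target lo mid
    let right := pvBest list_of_lists target mid hi
    if right.length > left.length then right else left
termination_by hi - lo
decreasing_by all_goals omega

def longest_sublist_with_sum_greater_than_target_alt (list_of_lists : List (List Int)) (target : Int) : List Int :=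
  pvBest list_of_lists target 0 list_of_lists.length

-- ===== PRECONDITION & SPEC =====
def Spec_longest_sublist_with_sum_greater_than_target (list_of_lists : List (List Int)) (target : Int) (out : List Int) : Prop := out = longest_sublist_with_sum_greater_than_target_alt list_of_lists target
instance (list_of_lists : List (List Int)) (target : Int) (out : List Int) : Decidable (Spec_longest_sublist_with_sum_greater_than_target list_of_lists target out) := by unfold Spec_longest_sublist_with_sum_greater_than_target; infer_instance

-- ===== CLAIM (what is proved, stated in full; the proofs are below) =====
def Claim_equal_longest_sublist_with_sum_greater_than_target : Prop := ∀ (list_of_lists : List (List Int)) (target : Int), Dom_longest_sublist_with_sum_greater_than_target list_of_lists target → Spec_longest_sublist_with_sum_greater_than_target list_of_lists target (longest_sublist_with_sum_greater_than_target list_of_lists target)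

-- ===== LEMMAS AND PROOFS =====

-- A's loop, with the redundant length accumulator collapsed away.
def pvFoldA (target : Int) (l : List (List Int)) (b : List Int) : List Int :=
  l.foldl (fun best s => if s.sum > target ∧ s.length > best.length then s else best) b

lemma pvFoldA_nil (target : Int) (b : List Int) : pvFoldA target [] b = b := rfl

lemma pvFoldA_cons (target : Int) (s : List Int) (t : List (List Int)) (b : List Int) :
    pvFoldA target (s :: t) b
      = pvFoldA target t (if s.sum > target ∧ s.length > b.length then s else b) := rfl

lemma pvFoldA_append (target : Int) (l₁ l₂ : List (List Int)) (b : List Int) :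
    pvFoldA target (l₁ ++ l₂) b = pvFoldA target l₂ (pvFoldA target l₁ b) :=
  List.foldl_append

-- A's fold carries (best, best.length); the pair collapses to pvFoldA.
lemma pvFoldA_fst (target : Int) (l : List (List Int)) (b : List Int) :
    (l.foldl
      (fun (st : List Int × Nat) sublist =>
        let sublist_sum := sublist.sum
        if sublist_sum > target ∧ sublist.length > st.2 then (sublist, sublist.length) else st)
      (b, b.length)).1
    = pvFoldA target l b := by
  induction l generalizing b with
  | nil => rfl
  | cons s t ih =>
      simp only [List.foldl, pvFoldA]
      by_cases h : s.sum > target ∧ s.length > b.length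
      · rw [if_pos h, if_pos h]; exact ih s
      · rw [if_neg h, if_neg h]; exact ih b

-- the one-element step from [] never changes the VALUE by the missing length test
lemma pvStep_nil (target : Int) (s : List Int) (hp : s.sum > target) :
    (if s.sum > target ∧ s.length > ([] : List Int).length then s else []) = s := by
  rcases s with _ | ⟨x, xs⟩
  · simp
  · rw [if_pos ⟨hp, by simp⟩]

-- restarting A's fold from b equals comparing b with the fold from [].
lemma pvFoldA_start (target : Int) (l : List (List Int)) (b : List Int) :
    pvFoldA target l b
      = if (pvFoldA target l []).length > b.length then pvFoldA target l [] else b := by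
  induction l generalizing b with
  | nil => simp [pvFoldA_nil]
  | cons s t ih =>
      rw [pvFoldA_cons, pvFoldA_cons,
          ih (if s.sum > target ∧ s.length > b.length then s else b),
          ih (if s.sum > target ∧ s.length > ([] : List Int).length then s else [])]
      by_cases hp : s.sum > target
      · rw [pvStep_nil target s hp]
        split_ifs <;> first | rfl | omega | (simp only [List.length_nil] at *; omega)
      · split_ifs <;> first | rfl | omega | (simp only [List.length_nil] at *; omega)

-- pvBest computes A's collapsed fold over the slice [lo, hi) of the input.
lemma pvBest_eq_foldA (l : List (List Int)) (target : Int) :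
    ∀ (n lo hi : Nat), hi - lo ≤ n → hi ≤ l.length →
      pvBest l target lo hi = pvFoldA target ((l.drop lo).take (hi - lo)) [] := by
  intro n
  induction n with
  | zero =>
      intro lo hi hn _
      rw [pvBest, if_pos (by omega), Nat.eq_zero_of_le_zero hn]
      rfl
  | succ m ih =>
      intro lo hi hn hlen
      rw [pvBest]
      by_cases h0 : hi - lo = 0
      · rw [if_pos h0, h0]; rfl
      · rw [if_neg h0]
        by_cases h1 : hi - lo = 1
        · rw [if_pos h1, h1]
          have hlo : lo < l.length := by omega
          rw [List.drop_eq_getElem_cons hlo]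
          simp only [List.take_succ_cons, List.take_zero]
          rw [pvFoldA_cons, pvFoldA_nil]
          have hget : l.getD lo [] = l[lo] := List.getD_eq_getElem l [] hlo
          simp only [hget]
          by_cases hp : l[lo].sum > target
          · rw [if_pos hp, pvStep_nil target (l[lo]) hp]
          · rw [if_neg hp, if_neg (fun h => hp h.1)]
        · rw [if_neg h1]
          dsimp only
          have hmid2 : (lo + hi) / 2 < hi := by omega
          rw [ih lo ((lo + hi) / 2) (by omega) (by omega),
              ih ((lo + hi) / 2) hi (by omega) hlen]
          have hsplit : (l.drop lo).take (hi - lo)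
              = (l.drop lo).take ((lo + hi) / 2 - lo)
                ++ ((l.drop ((lo + hi) / 2)).take (hi - (lo + hi) / 2)) := by
            have hd : l.drop ((lo + hi) / 2) = (l.drop lo).drop ((lo + hi) / 2 - lo) := by
              rw [List.drop_drop]; congr 1; omega
            rw [hd, ← List.take_add]
            congr 1; omega
          rw [hsplit, pvFoldA_append,
              pvFoldA_start target ((l.drop ((lo + hi) / 2)).take (hi - (lo + hi) / 2))
                (pvFoldA target ((l.drop lo).take ((lo + hi) / 2 - lo)) [])]

-- ===== VERDICT (by name: the statement is the Claim_ definition above) =====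
theorem longest_sublist_with_sum_greater_than_target_spec : Claim_equal_longest_sublist_with_sum_greater_than_target := by
  intro l target _
  show _ = _
  have hB : longest_sublist_with_sum_greater_than_target_alt l target = pvFoldA target l [] := by
    unfold longest_sublist_with_sum_greater_than_target_alt
    rw [pvBest_eq_foldA l target l.length 0 l.length (by omega) (le_refl _)]
    simp
  rw [hB]
  unfold longest_sublist_with_sum_greater_than_target
  exact pvFoldA_fst target l []
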